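-- pv_equiv track=rewrite | github.com/andrewcowman/Python | normalization.py | enumerate_classes
-- ===== SOURCE A (Python) =====
-- def enumerate_classes(data, col):
--     species = {}
--     idx = 0
--     for row in data:
--         key = row[col]
--         if key not in species:
--             species[key] = idx
--             idx += 1
--     return species
-- ===== SOURCE B (Python) =====
-- def enumerate_classes(data, col):
--     # Scan the rows BACKWARDS, overwriting: the last write for a key is its
--     # first-occurrence row index. Then sort the distinct keys by that index
--     # and enumerate them.  No membership test, no manual counter.
--     first = {}
--     for i in range(len(data) - 1, -1, -1):
--         first[data[i][col]] = i
--     order = sorted(first, key=first.get)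
--     return {key: idx for idx, key in enumerate(order)}
-- ===== Notes on version B (the rewrite author's own statement) =====
-- stated objective: alternative
-- what changed: B scans the rows backwards overwriting a key-to-row-index dict (last write wins = first occurrence, no membership test and no counter), then sorts the distinct keys by that first-occurrence index and assigns enumeration indices; A runs one forward fused membership-check-plus-counter loop.
import Mathlib
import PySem

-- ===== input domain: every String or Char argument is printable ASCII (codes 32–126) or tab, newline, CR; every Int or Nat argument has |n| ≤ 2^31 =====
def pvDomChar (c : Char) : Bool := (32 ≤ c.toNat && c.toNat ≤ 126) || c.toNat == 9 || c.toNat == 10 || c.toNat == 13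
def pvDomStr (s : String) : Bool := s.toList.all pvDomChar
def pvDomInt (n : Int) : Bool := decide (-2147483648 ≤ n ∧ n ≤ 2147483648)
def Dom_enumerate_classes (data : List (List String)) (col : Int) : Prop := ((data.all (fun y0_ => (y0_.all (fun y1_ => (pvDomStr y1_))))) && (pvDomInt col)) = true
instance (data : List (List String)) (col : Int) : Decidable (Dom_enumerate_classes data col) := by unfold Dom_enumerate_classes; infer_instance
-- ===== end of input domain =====

-- B scans the rows backwards overwriting a key→first-row-index dict, then sorts the distinct
-- keys by that index and enumerates them; equivalence of the RETURN value is proved on inputs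
-- where every row has column col.

-- ===== PORT A =====
-- species = {}; idx = 0; for row in data: key = row[col]; if key not in species: species[key] = idx; idx += 1
def enumerate_classes (data : List (List String)) (col : Int) : List (String × Int) :=
  (data.foldl
    (fun (st : PySem.Dict String Int × Int) row =>
      -- key = row[col]; a none (IndexError) is excluded by Pre_
      if st.1.contains ((PySem.List.pyGet? row col).getD "") then st
      else (st.1.insert ((PySem.List.pyGet? row col).getD "") st.2, st.2 + 1))
    (PySem.Dict.empty, 0)).1.items

-- ===== PORT B =====
-- first = {}; for i in range(len(data)-1, -1, -1): first[data[i][col]] = i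
-- order = sorted(first, key=first.get)      (keys are all present, so first.get k = first.getD k _)
-- return {key: idx for idx, key in enumerate(order)}
def enumerate_classes_alt (data : List (List String)) (col : Int) : List (String × Int) :=
  let first :=
    (PySem.List.pyRange ((data.length : Int) - 1) (-1) (-1)).foldl
      (fun (d : PySem.Dict String Int) i =>
        d.insert ((PySem.List.pyGet?
          ((PySem.List.pyGet? data i).getD []) col).getD "") i)
      PySem.Dict.empty
  let order := PySem.List.sorted first.keys (fun k => first.getD k 0) false
  (PySem.List.enumerate order 0).map (fun p => (p.2, p.1))

-- ===== PRECONDITION & SPEC =====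
-- Pre_ excludes exactly the inputs where some row[col] raises IndexError in Python.
def Pre_enumerate_classes (data : List (List String)) (col : Int) : Prop :=
  ∀ row ∈ data, -(row.length : Int) ≤ col ∧ col < row.length
instance (data : List (List String)) (col : Int) : Decidable (Pre_enumerate_classes data col) := by
  unfold Pre_enumerate_classes; infer_instance
def pvWitness_enumerate_classes : List (List String) × Int := ([["a", "x"], ["b", "x"], ["a", "y"]], 0)

def Spec_enumerate_classes (data : List (List String)) (col : Int) (out : List (String × Int)) : Prop := out = enumerate_classes_alt data col
instance (data : List (List String)) (col : Int) (out : List (String × Int)) : Decidable (Spec_enumerate_classes data col out) := by unfold Spec_enumerate_classes; infer_instance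

-- ===== CLAIM (what is proved, stated in full; the proofs are below) =====
def Claim_equal_enumerate_classes : Prop := ∀ (data : List (List String)) (col : Int), Dom_enumerate_classes data col → Pre_enumerate_classes data col → Spec_enumerate_classes data col (enumerate_classes data col)

-- ===== LEMMAS AND PROOFS =====

/-- The column values, in row order (well defined under Pre_). -/
def colVals (data : List (List String)) (col : Int) : List String :=
  data.map (fun row => (PySem.List.pyGet? row col).getD "")

/-- The pairs B builds from a list of distinct keys. -/
def enumPairs (L : List String) : List (String × Int) :=
  (PySem.List.enumerate L 0).map (fun p => (p.2, p.1))

-- ---------- A-side: A's fold produces enumPairs of the ordered distinct values ----------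

lemma keys_mk_enumPairs (L : List String) :
    (PySem.Dict.mk (enumPairs L)).keys = L := by
  simp [enumPairs, PySem.Dict.keys_mk, List.map_map, Function.comp_def,
    PySem.List.map_snd_enumerate]

lemma enumPairs_append_singleton (L : List String) (k : String) :
    enumPairs (L ++ [k]) = enumPairs L ++ [(k, (L.length : Int))] := by
  simp [enumPairs, PySem.List.enumerate_append, PySem.List.enumerate_cons,
    PySem.List.enumerate_nil]

lemma fold_invariant (keys L : List String) :
    keys.foldl
      (fun (st : PySem.Dict String Int × Int) key =>
        if st.1.contains key then st else (st.1.insert key st.2, st.2 + 1))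
      (PySem.Dict.mk (enumPairs L), (L.length : Int))
    = (PySem.Dict.mk (enumPairs (keys.foldl PySem.Set.add L)),
       ((keys.foldl PySem.Set.add L).length : Int)) := by
  induction keys generalizing L with
  | nil => rfl
  | cons k ks ih =>
    have hc : (PySem.Dict.mk (enumPairs L)).contains k = decide (k ∈ L) := by
      rw [PySem.Dict.contains_eq_decide_mem_keys, keys_mk_enumPairs]
    by_cases h : k ∈ L
    · have hadd : PySem.Set.add L k = L := by simp [PySem.Set.add, h]
      simp only [List.foldl_cons, hc, h, decide_true, if_true, hadd]
      exact ih L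
    · have hadd : PySem.Set.add L k = L ++ [k] := by simp [PySem.Set.add, h]
      have hins : (PySem.Dict.mk (enumPairs L)).insert k (L.length : Int)
          = PySem.Dict.mk (enumPairs (L ++ [k])) := by
        apply PySem.Dict.ext
        rw [PySem.Dict.items_insert_of_not_contains _ _ (by simp [hc, h])]
        simp [enumPairs_append_singleton]
      simp only [List.foldl_cons, hc, h, decide_false, hadd]
      have := ih (L ++ [k])
      simpa [hins, Int.add_comm] using this

lemma a_side (data : List (List String)) (col : Int) :
    enumerate_classes data col = enumPairs (PySem.List.dedup (colVals data col)) := by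
  unfold enumerate_classes
  rw [← List.foldl_map
    (f := fun row : List String => (PySem.List.pyGet? row col).getD "")
    (g := fun (st : PySem.Dict String Int × Int) key =>
      if st.1.contains key then st else (st.1.insert key st.2, st.2 + 1))
    (l := data) (init := (PySem.Dict.empty, (0 : Int)))]
  have h0 : (PySem.Dict.empty : PySem.Dict String Int) = PySem.Dict.mk (enumPairs []) := rfl
  rw [h0, show ((0 : Int)) = (([] : List String).length : Int) from rfl,
    fold_invariant (data.map (fun row => (PySem.List.pyGet? row col).getD "")) []]
  simp [PySem.List.dedup_eq_ofList, PySem.Set.ofList_eq_foldl, colVals, enumPairs]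

-- ---------- B-side ----------

/-- B's backward loop, as a fold over enumerated (value, index) pairs in reverse. -/
def revDict (vals : List String) (s : Int) (d0 : PySem.Dict String Int) :
    PySem.Dict String Int :=
  (((PySem.List.enumerate vals s).map (fun p => (p.2, p.1))).reverse).foldl
    (fun d p => d.insert p.1 p.2) d0

lemma revDict_cons (x : String) (xs : List String) (s : Int) (d0 : PySem.Dict String Int) :
    revDict (x :: xs) s d0 = (revDict xs (s + 1) d0).insert x s := by
  simp [revDict, PySem.List.enumerate_cons, List.foldl_append]

lemma revDict_get? (vals : List String) (s : Int) (d0 : PySem.Dict String Int) (k : String) :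
    (revDict vals s d0).get? k
      = if k ∈ vals then some (s + (vals.idxOf k : Int)) else d0.get? k := by
  induction vals generalizing s with
  | nil => simp [revDict, PySem.List.enumerate_nil]
  | cons x xs ih =>
    rw [revDict_cons, PySem.Dict.get?_insert]
    by_cases hk : k = x
    · subst hk; simp [List.idxOf_cons_self]
    · rw [if_neg hk, ih]
      by_cases hin : k ∈ xs
      · rw [if_pos hin, if_pos (by simp [hin]),
          List.idxOf_cons_ne _ (fun h => hk h.symm)]
        congr 1
        push_cast [Nat.succ_eq_add_one]
        ring
      · rw [if_neg hin, if_neg (by simp [hk, hin])]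

lemma revDict_keys (vals : List String) (s : Int) :
    (revDict vals s PySem.Dict.empty).keys
      = PySem.Set.ofList vals.reverse := by
  unfold revDict
  rw [PySem.Dict.keys_foldl_insert_key
    (key := Prod.fst) (f := fun _ p => p.2)]
  rw [show (PySem.Dict.empty : PySem.Dict String Int).keys = [] from rfl,
    PySem.Set.update_nil_left]
  congr 1
  simp [List.map_map, Function.comp_def, PySem.List.map_snd_enumerate]

/-- The ordered distinct values are strictly increasing in first-occurrence index. -/
lemma dedup_pairwise_idxOf (l : List String) :
    (PySem.List.dedup l).Pairwise (fun a b => l.idxOf a < l.idxOf b) := by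
  simp only [PySem.List.dedup_eq_ofList]
  induction l with
  | nil => simp [PySem.Set.ofList]
  | cons x xs ih =>
    rw [PySem.Set.ofList_cons]
    constructor
    · intro b hb
      have hbmem := (PySem.Set.mem_discard _ _ _).1 hb
      have hbx : b ∈ xs := (PySem.Set.mem_ofList _ _).1 hbmem.1
      rw [List.idxOf_cons_self, List.idxOf_cons_ne _ (fun h => hbmem.2 h.symm)]
      omega
    · have hsub : ((PySem.Set.ofList xs).discard x).Sublist (PySem.Set.ofList xs) := by
        simp only [PySem.Set.discard]
        exact List.filter_sublist
      refine ((List.Pairwise.sublist hsub ih).imp_of_mem ?_)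
      intro a b ha hb hab
      have hax := ((PySem.Set.mem_discard _ _ _).1 ha).2
      have hbx := ((PySem.Set.mem_discard _ _ _).1 hb).2
      rw [List.idxOf_cons_ne _ (fun h => hax h.symm),
          List.idxOf_cons_ne _ (fun h => hbx h.symm)]
      omega

lemma b_side (data : List (List String)) (col : Int) :
    enumerate_classes_alt data col = enumPairs (PySem.List.dedup (colVals data col)) := by
  simp only [enumerate_classes_alt]
  set vals := colVals data col with hvals
  have hlen : vals.length = data.length := by simp [hvals, colVals]
  have hrange : PySem.List.pyRange ((data.length : Int) - 1) (-1) (-1)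
      = (PySem.List.pyRange 0 (data.length : Int) 1).reverse := by
    rw [PySem.List.pyRange_neg_one_eq_reverse]; norm_num
  have hbody : ∀ (d : PySem.Dict String Int), ∀ i ∈ (PySem.List.pyRange 0 (data.length : Int) 1).reverse,
      d.insert ((PySem.List.pyGet? ((PySem.List.pyGet? data i).getD []) col).getD "") i
        = d.insert (PySem.List.pyGetD vals i "") i := by
    intro d i hi
    rw [List.mem_reverse, PySem.List.mem_pyRange_one] at hi
    have hi' : i.toNat < data.length := by omega
    have hcast : i = ((i.toNat : Nat) : Int) := by omega
    rw [hcast, PySem.List.pyGet?_natCast, List.getElem?_eq_getElem hi']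
    have : PySem.List.pyGetD vals ((i.toNat : Nat) : Int) ""
        = (PySem.List.pyGet? (data[i.toNat]) col).getD "" := by
      rw [PySem.List.pyGetD_natCast, List.getD_eq_getElem _ _ (by omega)]
      simp [hvals, colVals]
    rw [this]
    simp
  have hfold :
      (PySem.List.pyRange ((data.length : Int) - 1) (-1) (-1)).foldl
        (fun (d : PySem.Dict String Int) i =>
          d.insert ((PySem.List.pyGet? ((PySem.List.pyGet? data i).getD []) col).getD "") i)
        PySem.Dict.empty
      = revDict vals 0 PySem.Dict.empty := by
    rw [hrange, PySem.List.foldl_congr_mem _ _ _ _ hbody]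
    unfold revDict
    rw [← List.foldl_map (f := fun i : Int => (PySem.List.pyGetD vals i "", i))
      (g := fun (d : PySem.Dict String Int) p => d.insert p.1 p.2)]
    congr 1
    rw [PySem.List.enumerate_eq_map_pyRange (d := ""), ← List.map_reverse]
    simp [List.map_map, Function.comp_def, hlen]
  rw [hfold]
  set first := revDict vals 0 PySem.Dict.empty with hfirst
  have hsorted : PySem.List.sorted first.keys (fun k => first.getD k 0) false
      = PySem.List.dedup vals := by
    apply PySem.List.sorted_eq_of_perm_of_pairwise_lt
    · rw [List.perm_ext_iff_of_nodup (PySem.List.nodup_dedup _)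
        (by rw [hfirst, revDict_keys]; exact PySem.Set.nodup_ofList _)]
      intro a
      rw [hfirst, revDict_keys]
      simp [PySem.Set.mem_ofList]
    · have hval : ∀ k ∈ vals, first.getD k 0 = (vals.idxOf k : Int) := by
        intro k hk
        rw [hfirst, PySem.Dict.getD_eq_get?_getD, revDict_get?]
        simp [hk]
      refine (dedup_pairwise_idxOf vals).imp_of_mem ?_
      intro a b ha hb hab
      rw [hval a ((PySem.List.mem_dedup _ _).1 ha), hval b ((PySem.List.mem_dedup _ _).1 hb)]
      exact_mod_cast hab
  rw [hsorted]
  rfl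

-- ===== VERDICT (by name: the statement is the Claim_ definition above) =====
theorem enumerate_classes_spec : Claim_equal_enumerate_classes := by
  intro data col _ _
  show enumerate_classes data col = enumerate_classes_alt data col
  rw [a_side, b_side data col]
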